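-- pv_equiv track=rewrite | github.com/quemeb/SNP-Annotation-Agreement-and-Downstream-Impact-Analysis | scripts/ensembl_refseq_UniProt.py | map_refseq
-- ===== SOURCE A (Python) =====
-- def map_refseq(genes, loc_map, sym_map):
--     mapped, total_unmatched, unique_unmatched = [], 0, set()
--     for gene_list in genes:
--         temp, seen = [], set()
--         for g in gene_list:
--             mg = loc_map.get(g[3:]) if g.startswith("LOC") and g[3:].isdigit() else sym_map.get(g)
--             if mg: temp.append(mg)
--             else:
--                 if g not in seen:
--                     seen.add(g)
--                     total_unmatched += 1
--                 unique_unmatched.add(g)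
--         mapped.append(temp)
--     return mapped, total_unmatched, len(unique_unmatched)
-- ===== SOURCE B (Python) =====
-- def map_refseq(genes, loc_map, sym_map):
--     def lookup(g):
--         return loc_map.get(g[3:]) if g.startswith("LOC") and g[3:].isdigit() else sym_map.get(g)
--     # pass 1: one GLOBAL set of every distinct unmatched gene across all lists
--     bad = set()
--     for g in (g for gl in genes for g in gl):
--         if not lookup(g):
--             bad.add(g)
--     # pass 2: the successful translations, list by list
--     mapped = [[v for v in map(lookup, gl) if v] for gl in genes]
--     # pass 3: per-list unmatched totals are sizes of intersections with the global bad set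
--     total_unmatched = sum(len(bad.intersection(gl)) for gl in genes)
--     return mapped, total_unmatched, len(bad)
-- ===== Notes on version B (the rewrite author's own statement) =====
-- stated objective: alternative
-- what changed: B keeps no per-list 'seen' sets or running counters: it builds one global set of unmatched genes over the flattened input, maps each list independently, and recovers the per-list distinct-unmatched totals afterwards as sizes of intersections of that global set with each list.
import Mathlib
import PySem

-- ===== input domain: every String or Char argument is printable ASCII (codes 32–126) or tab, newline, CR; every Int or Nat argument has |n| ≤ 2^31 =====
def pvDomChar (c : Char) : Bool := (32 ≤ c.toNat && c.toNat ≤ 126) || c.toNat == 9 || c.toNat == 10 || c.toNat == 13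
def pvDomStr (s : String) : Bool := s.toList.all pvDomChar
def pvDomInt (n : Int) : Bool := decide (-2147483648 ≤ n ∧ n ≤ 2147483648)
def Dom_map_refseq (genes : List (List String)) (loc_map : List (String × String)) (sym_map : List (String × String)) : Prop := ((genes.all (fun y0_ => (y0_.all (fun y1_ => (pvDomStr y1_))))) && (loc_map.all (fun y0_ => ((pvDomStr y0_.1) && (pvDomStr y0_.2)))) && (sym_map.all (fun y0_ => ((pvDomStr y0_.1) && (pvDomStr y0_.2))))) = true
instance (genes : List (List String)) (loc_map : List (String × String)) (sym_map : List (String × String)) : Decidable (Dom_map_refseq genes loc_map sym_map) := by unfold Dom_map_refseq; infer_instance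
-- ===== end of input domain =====

-- B drops A's per-list 'seen' sets and running counters: one global pass collects the set of all
-- unmatched genes, an independent pass maps each list, and per-list totals are recovered afterwards
-- as intersection sizes with the global set (objective: alternative decomposition, same values).

-- ===== PORT A =====
-- dict.get on an association list with unique keys = first match (exact)
def pvGet (d : List (String × String)) (k : String) : Option String :=
  (d.find? (fun p => p.1 == k)).map Prod.snd

-- mg = loc_map.get(g[3:]) if g.startswith("LOC") and g[3:].isdigit() else sym_map.get(g)
def pvLookup (loc_map sym_map : List (String × String)) (g : String) : Option String :=
  if PySem.Str.startswith g "LOC" && PySem.Str.strIsdigit (PySem.Str.slice g (some 3) none)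
  then pvGet loc_map (PySem.Str.slice g (some 3) none)
  else pvGet sym_map g

-- Python truthiness of mg (None and "" are falsy)
def pvTruthy (mg : Option String) : Bool :=
  match mg with
  | some s => !(s == "")
  | none => false

def map_refseq (genes : List (List String)) (loc_map : List (String × String)) (sym_map : List (String × String)) : List (List String) × Int × Int :=
  let st := genes.foldl
    (fun (acc : List (List String) × Int × PySem.Set String) gene_list =>
      let inner := gene_list.foldl
        (fun (s : List String × PySem.Set String × Int × PySem.Set String) g =>
          let mg := pvLookup loc_map sym_map g
          if pvTruthy mg then (s.1 ++ [mg.getD ""], s.2.1, s.2.2.1, s.2.2.2)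
          else
            let su := if PySem.Set.contains s.2.1 g then (s.2.1, s.2.2.1)
                      else (PySem.Set.add s.2.1 g, s.2.2.1 + 1)
            (s.1, su.1, su.2, PySem.Set.add s.2.2.2 g))
        ([], PySem.Set.empty, acc.2.1, acc.2.2)
      (acc.1 ++ [inner.1], inner.2.2.1, inner.2.2.2))
    ([], 0, PySem.Set.empty)
  (st.1, st.2.1, PySem.Set.len st.2.2)

-- ===== PORT B =====
def map_refseq_alt (genes : List (List String)) (loc_map : List (String × String)) (sym_map : List (String × String)) : List (List String) × Int × Int :=
  -- pass 1: the global set of all distinct unmatched genes (loop over the flattened input)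
  let bad : PySem.Set String := genes.flatten.foldl
    (fun s g => if pvTruthy (pvLookup loc_map sym_map g) then s else PySem.Set.add s g)
    PySem.Set.empty
  -- pass 2: the successful translations, list by list
  let mapped := genes.map (fun gl => gl.filterMap (fun g =>
      let mg := pvLookup loc_map sym_map g
      if pvTruthy mg then mg else none))
  -- pass 3: per-list totals = sizes of intersections with the global bad set
  let total := (genes.map (fun gl => PySem.Set.len (PySem.Set.inter bad gl))).sum
  (mapped, total, PySem.Set.len bad)

-- ===== PRECONDITION & SPEC =====
def Spec_map_refseq (genes : List (List String)) (loc_map : List (String × String)) (sym_map : List (String × String)) (out : List (List String) × Int × Int) : Prop := out = map_refseq_alt genes loc_map sym_map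
instance (genes : List (List String)) (loc_map : List (String × String)) (sym_map : List (String × String)) (out : List (List String) × Int × Int) : Decidable (Spec_map_refseq genes loc_map sym_map out) := by unfold Spec_map_refseq; infer_instance

-- ===== CLAIM =====
def Claim_equal_map_refseq : Prop := ∀ (genes : List (List String)) (loc_map : List (String × String)) (sym_map : List (String × String)), Dom_map_refseq genes loc_map sym_map → Spec_map_refseq genes loc_map sym_map (map_refseq genes loc_map sym_map)

-- ===== LEMMAS AND PROOFS =====

-- proof-side names for A's two loop bodies (definitionally equal to the lambdas in map_refseq)
def stepA (loc_map sym_map : List (String × String)) (s : List String × PySem.Set String × Int × PySem.Set String) (g : String) : List String × PySem.Set String × Int × PySem.Set String :=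
  let mg := pvLookup loc_map sym_map g
  if pvTruthy mg then (s.1 ++ [mg.getD ""], s.2.1, s.2.2.1, s.2.2.2)
  else
    let su := if PySem.Set.contains s.2.1 g then (s.2.1, s.2.2.1)
              else (PySem.Set.add s.2.1 g, s.2.2.1 + 1)
    (s.1, su.1, su.2, PySem.Set.add s.2.2.2 g)

def outerA (loc_map sym_map : List (String × String)) (acc : List (List String) × Int × PySem.Set String) (gene_list : List String) : List (List String) × Int × PySem.Set String :=
  let inner := gene_list.foldl (stepA loc_map sym_map) ([], PySem.Set.empty, acc.2.1, acc.2.2)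
  (acc.1 ++ [inner.1], inner.2.2.1, inner.2.2.2)

-- per-list mapped values and unmatched occurrences, as named functions
def pvT (loc_map sym_map : List (String × String)) (gl : List String) : List String :=
  gl.filterMap (fun g =>
    let mg := pvLookup loc_map sym_map g
    if pvTruthy mg then mg else none)

def pvU (loc_map sym_map : List (String × String)) (gl : List String) : List String :=
  gl.filter (fun g => !pvTruthy (pvLookup loc_map sym_map g))

lemma len_append_singleton {α : Type} (s : List α) (x : α) :
    PySem.Set.len (s ++ [x]) = PySem.Set.len s + 1 := by
  simp [PySem.Set.len]

lemma stepA_truthy (loc_map sym_map : List (String × String)) {g : String} {v : String}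
    (hmg : pvLookup loc_map sym_map g = some v) (htr : pvTruthy (some v) = true)
    (st : List String × PySem.Set String × Int × PySem.Set String) :
    stepA loc_map sym_map st g = (st.1 ++ [v], st.2.1, st.2.2.1, st.2.2.2) := by
  simp [stepA, hmg, htr]

lemma stepA_miss_mem (loc_map sym_map : List (String × String)) {g : String} {seen : PySem.Set String}
    (hfa : pvTruthy (pvLookup loc_map sym_map g) = false) (hm : g ∈ seen)
    (temp : List String) (tot : Int) (unq : PySem.Set String) :
    stepA loc_map sym_map (temp, seen, tot, unq) g = (temp, seen, tot, PySem.Set.add unq g) := by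
  simp [stepA, hfa, hm]

lemma stepA_miss_new (loc_map sym_map : List (String × String)) {g : String} {seen : PySem.Set String}
    (hfa : pvTruthy (pvLookup loc_map sym_map g) = false) (hm : g ∉ seen)
    (temp : List String) (tot : Int) (unq : PySem.Set String) :
    stepA loc_map sym_map (temp, seen, tot, unq) g = (temp, PySem.Set.add seen g, tot + 1, PySem.Set.add unq g) := by
  simp [stepA, hfa, hm]

-- characterization of A's inner loop over one gene_list
lemma inner_char (loc_map sym_map : List (String × String)) (gl : List String) :
    ∀ (temp : List String) (seen : PySem.Set String) (tot : Int) (unq : PySem.Set String),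
    gl.foldl (stepA loc_map sym_map) (temp, seen, tot, unq)
    = (temp ++ pvT loc_map sym_map gl,
       PySem.Set.update seen (pvU loc_map sym_map gl),
       tot + (PySem.Set.len (PySem.Set.update seen (pvU loc_map sym_map gl)) - PySem.Set.len seen),
       PySem.Set.update unq (pvU loc_map sym_map gl)) := by
  induction gl with
  | nil =>
    intro temp seen tot unq
    simp [pvT, pvU, PySem.Set.update_nil]
  | cons g gl ih =>
    intro temp seen tot unq
    rw [List.foldl_cons]
    by_cases h : pvTruthy (pvLookup loc_map sym_map g) = true
    · cases hmg : pvLookup loc_map sym_map g with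
      | none => rw [hmg] at h; simp [pvTruthy] at h
      | some v =>
        have htr : pvTruthy (some v) = true := by rw [← hmg]; exact h
        have hT : pvT loc_map sym_map (g :: gl) = v :: pvT loc_map sym_map gl := by
          simp [pvT, hmg, htr]
        have hU : pvU loc_map sym_map (g :: gl) = pvU loc_map sym_map gl := by
          simp [pvU, hmg, htr]
        rw [stepA_truthy loc_map sym_map hmg htr (temp, seen, tot, unq), hT, hU]
        exact (ih (temp ++ [v]) seen tot unq).trans (by simp)
    · have hfa : pvTruthy (pvLookup loc_map sym_map g) = false := by
        cases hb : pvTruthy (pvLookup loc_map sym_map g) with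
        | false => rfl
        | true => exact absurd hb h
      have hT : pvT loc_map sym_map (g :: gl) = pvT loc_map sym_map gl := by
        simp [pvT, hfa]
      have hU : pvU loc_map sym_map (g :: gl) = g :: pvU loc_map sym_map gl := by
        simp [pvU, hfa]
      rw [hT, hU, PySem.Set.update_cons seen g (pvU loc_map sym_map gl),
          PySem.Set.update_cons unq g (pvU loc_map sym_map gl)]
      by_cases hm : g ∈ seen
      · rw [stepA_miss_mem loc_map sym_map hfa hm temp tot unq, PySem.Set.add_of_mem hm]
        exact ih temp seen tot (PySem.Set.add unq g)
      · rw [stepA_miss_new loc_map sym_map hfa hm temp tot unq]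
        have hl : PySem.Set.len (PySem.Set.add seen g) = PySem.Set.len seen + 1 := by
          rw [PySem.Set.add_of_not_mem hm]; exact len_append_singleton seen g
        refine (ih temp (PySem.Set.add seen g) (tot + 1) (PySem.Set.add unq g)).trans ?_
        refine congrArg₂ Prod.mk rfl (congrArg₂ Prod.mk rfl (congrArg₂ Prod.mk ?_ rfl))
        rw [hl]; ring

-- characterization of A's outer loop
lemma outer_char (loc_map sym_map : List (String × String)) (genes : List (List String)) :
    ∀ (mapped : List (List String)) (tot : Int) (unq : PySem.Set String),
    genes.foldl (outerA loc_map sym_map) (mapped, tot, unq)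
    = (mapped ++ genes.map (pvT loc_map sym_map),
       tot + (genes.map fun gl => PySem.Set.len (PySem.Set.ofList (pvU loc_map sym_map gl))).sum,
       genes.foldl (fun a gl => PySem.Set.update a (pvU loc_map sym_map gl)) unq) := by
  induction genes with
  | nil => intro mapped tot unq; simp
  | cons gl genes ih =>
    intro mapped tot unq
    rw [List.foldl_cons]
    have hstep : outerA loc_map sym_map (mapped, tot, unq) gl
        = (mapped ++ [pvT loc_map sym_map gl],
           tot + PySem.Set.len (PySem.Set.ofList (pvU loc_map sym_map gl)),
           PySem.Set.update unq (pvU loc_map sym_map gl)) := by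
      show (mapped ++ [(gl.foldl (stepA loc_map sym_map) ([], PySem.Set.empty, tot, unq)).1],
            (gl.foldl (stepA loc_map sym_map) ([], PySem.Set.empty, tot, unq)).2.2.1,
            (gl.foldl (stepA loc_map sym_map) ([], PySem.Set.empty, tot, unq)).2.2.2) = _
      rw [inner_char loc_map sym_map gl [] PySem.Set.empty tot unq]
      refine congrArg₂ Prod.mk rfl (congrArg₂ Prod.mk ?_ rfl)
      show tot + (PySem.Set.len (PySem.Set.ofList (pvU loc_map sym_map gl)) - 0)
          = tot + PySem.Set.len (PySem.Set.ofList (pvU loc_map sym_map gl))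
      ring
    rw [hstep, ih]
    refine congrArg₂ Prod.mk (by simp) (congrArg₂ Prod.mk ?_ (by rw [List.foldl_cons]))
    simp only [List.map_cons, List.sum_cons]
    ring

-- B's first pass (the conditional-add fold) is the set of the filtered list
lemma badfold_char (loc_map sym_map : List (String × String)) (xs : List String) :
    ∀ (s : PySem.Set String),
    xs.foldl (fun s g => if pvTruthy (pvLookup loc_map sym_map g) then s else PySem.Set.add s g) s
    = PySem.Set.update s (xs.filter (fun g => !pvTruthy (pvLookup loc_map sym_map g))) := by
  induction xs with
  | nil => intro s; simp [PySem.Set.update_nil]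
  | cons g xs ih =>
    intro s
    rw [List.foldl_cons, List.filter_cons]
    cases h : pvTruthy (pvLookup loc_map sym_map g) with
    | true =>
      simp only [h, Bool.not_true, Bool.false_eq_true, if_false, if_true]
      exact ih s
    | false =>
      simp only [h, Bool.not_false, if_true, Bool.false_eq_true, if_false]
      rw [PySem.Set.update_cons s g]
      exact ih (PySem.Set.add s g)

-- filtering the flattened list = flattening the per-list filters
lemma filter_flatten {α : Type} (f : α → Bool) (ls : List (List α)) :
    ls.flatten.filter f = (ls.map (List.filter f)).flatten := by
  induction ls with
  | nil => rfl
  | cons l ls ih => simp [List.filter_append, ih]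

-- A's union-by-update fold = set of the flattened occurrence lists
lemma update_fold_char (ls : List (List String)) :
    ∀ (s : PySem.Set String),
    ls.foldl (fun a l => PySem.Set.update a l) s = PySem.Set.update s ls.flatten := by
  induction ls with
  | nil => intro s; simp [PySem.Set.update_nil]
  | cons l ls ih => intro s; simp [List.foldl_cons, ih, PySem.Set.update_append]

-- the global bad set, named for the proofs
def pvBad (genes : List (List String)) (loc_map sym_map : List (String × String)) : PySem.Set String :=
  PySem.Set.ofList (genes.flatten.filter (fun g => !pvTruthy (pvLookup loc_map sym_map g)))

lemma bad_eq_unq (genes : List (List String)) (loc_map sym_map : List (String × String)) :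
    genes.foldl (fun a gl => PySem.Set.update a (pvU loc_map sym_map gl)) PySem.Set.empty
    = pvBad genes loc_map sym_map := by
  have h : genes.foldl (fun a gl => PySem.Set.update a (pvU loc_map sym_map gl)) PySem.Set.empty
      = (genes.map (pvU loc_map sym_map)).foldl (fun a l => PySem.Set.update a l) PySem.Set.empty := by
    rw [List.foldl_map]
  rw [h, update_fold_char, pvBad, filter_flatten]
  rfl

-- per-list: the intersection of the global bad set with a member list has the same size as
-- the per-list distinct unmatched set
lemma inter_len (genes : List (List String)) (loc_map sym_map : List (String × String))
    {gl : List String} (hgl : gl ∈ genes) :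
    PySem.Set.len (PySem.Set.inter (pvBad genes loc_map sym_map) gl)
    = PySem.Set.len (PySem.Set.ofList (pvU loc_map sym_map gl)) := by
  have hnd1 : (PySem.Set.inter (pvBad genes loc_map sym_map) gl).Nodup :=
    PySem.Set.nodup_inter _ gl (PySem.Set.nodup_ofList _)
  have hnd2 : (PySem.Set.ofList (pvU loc_map sym_map gl)).Nodup := PySem.Set.nodup_ofList _
  have hmem : ∀ x, x ∈ PySem.Set.inter (pvBad genes loc_map sym_map) gl ↔
      x ∈ PySem.Set.ofList (pvU loc_map sym_map gl) := by
    intro x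
    rw [PySem.Set.mem_inter, PySem.Set.mem_ofList, pvBad, PySem.Set.mem_ofList,
        List.mem_filter, pvU, List.mem_filter]
    constructor
    · rintro ⟨⟨_, hb⟩, hx⟩; exact ⟨hx, hb⟩
    · rintro ⟨hx, hb⟩
      exact ⟨⟨List.mem_flatten.mpr ⟨gl, hgl, hx⟩, hb⟩, hx⟩
  have hperm : List.Perm (PySem.Set.inter (pvBad genes loc_map sym_map) gl)
      (PySem.Set.ofList (pvU loc_map sym_map gl)) :=
    (List.perm_ext_iff_of_nodup hnd1 hnd2).mpr hmem
  simp [PySem.Set.len, hperm.length_eq]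

lemma a_eq (genes : List (List String)) (loc_map sym_map : List (String × String)) :
    map_refseq genes loc_map sym_map
    = ((genes.foldl (outerA loc_map sym_map) ([], 0, PySem.Set.empty)).1,
       (genes.foldl (outerA loc_map sym_map) ([], 0, PySem.Set.empty)).2.1,
       PySem.Set.len (genes.foldl (outerA loc_map sym_map) ([], 0, PySem.Set.empty)).2.2) := rfl

lemma alt_eq (genes : List (List String)) (loc_map sym_map : List (String × String)) :
    map_refseq_alt genes loc_map sym_map
    = (genes.map (pvT loc_map sym_map),
       (genes.map (fun gl => PySem.Set.len (PySem.Set.inter (pvBad genes loc_map sym_map) gl))).sum,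
       PySem.Set.len (pvBad genes loc_map sym_map)) := by
  have hb : genes.flatten.foldl
      (fun s g => if pvTruthy (pvLookup loc_map sym_map g) then s else PySem.Set.add s g)
      PySem.Set.empty = pvBad genes loc_map sym_map := by
    rw [badfold_char]; rfl
  show (_, _, _) = _
  rw [hb]
  rfl

lemma map_refseq_eq (genes : List (List String)) (loc_map sym_map : List (String × String)) :
    map_refseq genes loc_map sym_map = map_refseq_alt genes loc_map sym_map := by
  rw [a_eq, outer_char loc_map sym_map genes [] 0 PySem.Set.empty, alt_eq, bad_eq_unq]
  refine congrArg₂ Prod.mk (by simp) (congrArg₂ Prod.mk ?_ rfl)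
  show 0 + (genes.map fun gl => PySem.Set.len (PySem.Set.ofList (pvU loc_map sym_map gl))).sum = _
  rw [zero_add]
  exact congrArg List.sum (List.map_congr_left fun gl hgl => (inter_len genes loc_map sym_map hgl).symm)

-- ===== VERDICT =====
theorem map_refseq_spec : Claim_equal_map_refseq := by
  intro genes loc_map sym_map _
  unfold Spec_map_refseq
  exact map_refseq_eq genes loc_map sym_map
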